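-- pv_equiv track=rewrite | github.com/syntra-vindevoy/python-1-2024 | chapter dicts/primes.py | primes_dict
-- ===== SOURCE A (Python) =====
-- def primes_dict (total_numbers):
--     prime_dict = {2:4,}
--     n = 3
--
--     while len(prime_dict) < total_numbers:
--
--         prime_check = True
--         for i in prime_dict:
--             if prime_dict[i] > n: break
--             if n % i == 0:
--                 prime_check = False
--                 break
--         if prime_check: prime_dict[n] = n * n
--         n += 2
--
--     return prime_dict.keys()
-- ===== SOURCE B (Python) =====
-- def _is_odd_prime(n):
--     d = 3
--     while d * d <= n:
--         if n % d == 0: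
--             return False
--         d += 2
--     return True
--
-- def primes_dict(total_numbers):
--     primes = [2]
--     n = 3
--     while len(primes) < total_numbers:
--         if _is_odd_prime(n):
--             primes.append(n)
--         n += 2
--     return primes
-- ===== Notes on version B (the rewrite author's own statement) =====
-- stated objective: simpler
-- what changed: B drops A's dict of prime->square memoization entirely: each odd candidate is tested independently by trial division over odd divisors up to its square root, and the primes are collected in a plain list instead of dict keys.
import Mathlib
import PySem

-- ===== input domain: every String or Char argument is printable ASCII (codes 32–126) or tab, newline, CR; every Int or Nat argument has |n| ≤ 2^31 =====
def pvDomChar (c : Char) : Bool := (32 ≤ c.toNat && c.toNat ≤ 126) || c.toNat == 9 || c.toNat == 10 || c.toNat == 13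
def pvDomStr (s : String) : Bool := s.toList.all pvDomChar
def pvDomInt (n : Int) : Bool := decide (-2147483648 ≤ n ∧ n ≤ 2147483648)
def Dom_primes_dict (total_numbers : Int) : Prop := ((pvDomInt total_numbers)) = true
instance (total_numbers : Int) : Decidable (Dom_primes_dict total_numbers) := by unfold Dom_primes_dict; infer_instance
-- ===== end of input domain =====

-- B replaces A's dict of prime→square memoization by independent trial division of each odd
-- candidate over odd divisors up to its square root (objective: simpler; return value only —
-- A returns dict keys, read as the list of the first-N primes).
-- Both while loops are ported with a fuel counter that only makes the same computation total;
-- pdFuel_* below prove the fuel is never exhausted on any input.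

-- ===== PORT A =====
-- fuel bound for both while loops (2^(total+1): by Bertrand at least total primes lie below it,
-- so the guard len < total fails before n reaches it; proved in pdCount_le_bound below)
def pdBound (total : Int) : Nat := 2 ^ (total.toNat + 1)

-- inner `for i in prime_dict:` loop of A; iterates the items (keys are unique, so Python's
-- lookup prime_dict[i] of an iterated key i is exactly the paired value), with both breaks
def pdCheckA (n : Int) : List (Int × Int) → Bool
  | [] => true
  | (i, v) :: rest =>
    if v > n then true
    else if PySem.Int.mod n i == 0 then false
    else pdCheckA n rest

-- A's while loop: test-and-insert, n += 2 (fuel only totalizes; never exhausted, see pdLoop_keys_eq)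
def pdLoopA (total : Int) : Nat → PySem.Dict Int Int → Int → PySem.Dict Int Int
  | 0, d, _ => d
  | fuel + 1, d, n =>
    if ((d.size : Nat) : Int) < total then
      pdLoopA total fuel (if pdCheckA n d.items then d.insert n (n * n) else d) (n + 2)
    else d

def primes_dict (total_numbers : Int) : List Int :=
  (pdLoopA total_numbers (pdBound total_numbers + 3) (PySem.Dict.ofList [(2, 4)]) 3).keys

-- ===== PORT B =====
-- `_is_odd_prime`'s while loop: trial division by d = 3, 5, 7, … while d*d ≤ n
-- (fuel only totalizes: under the guard d ≤ n, so n.toNat + 1 steps always suffice)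
def pdIsOddPrimeGo (n : Int) : Nat → Int → Bool
  | 0, _ => true
  | fuel + 1, d =>
    if d * d ≤ n then
      if PySem.Int.mod n d == 0 then false else pdIsOddPrimeGo n fuel (d + 2)
    else true

def pdIsOddPrime (n : Int) : Bool := pdIsOddPrimeGo n (n.toNat + 1) 3

-- B's while loop: primes = [2], append odd primes, n += 2 (same fuel bound as A's loop)
def pdLoopB (total : Int) : Nat → List Int → Int → List Int
  | 0, l, _ => l
  | fuel + 1, l, n =>
    if ((l.length : Nat) : Int) < total then
      pdLoopB total fuel (if pdIsOddPrime n then l ++ [n] else l) (n + 2)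
    else l

def primes_dict_alt (total_numbers : Int) : List Int :=
  pdLoopB total_numbers (pdBound total_numbers + 3) [2] 3

-- ===== PRECONDITION & SPEC =====
def Spec_primes_dict (total_numbers : Int) (out : List Int) : Prop := out = primes_dict_alt total_numbers
instance (total_numbers : Int) (out : List Int) : Decidable (Spec_primes_dict total_numbers out) := by unfold Spec_primes_dict; infer_instance

-- ===== CLAIM (what is proved, stated in full; the proofs are below) =====
def Claim_equal_primes_dict : Prop := ∀ (total_numbers : Int), Dom_primes_dict total_numbers → Spec_primes_dict total_numbers (primes_dict total_numbers)

-- ===== LEMMAS AND PROOFS =====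
-- the primes below m, in increasing order: the shared loop invariant
def pdPrimes (m : Nat) : List Nat := (List.range m).filter (fun p => decide (Nat.Prime p))

-- invariant of A's loop: the dict maps exactly the primes below n (in order) to their squares
def pdInvA (d : PySem.Dict Int Int) (n : Int) : Prop :=
  d.items = (pdPrimes n.toNat).map (fun p : Nat => ((p : Int), (p : Int) * (p : Int))) ∧ n % 2 = 1 ∧ 3 ≤ n

-- invariant of B's loop: the list holds exactly the primes below n, in order
def pdInvB (l : List Int) (n : Int) : Prop :=
  l = (pdPrimes n.toNat).map (fun p : Nat => (p : Int)) ∧ n % 2 = 1 ∧ 3 ≤ n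

theorem pdPrimes_length (m : Nat) : (pdPrimes m).length = Nat.count Nat.Prime m := by
  simp [pdPrimes, Nat.count, List.countP_eq_length_filter]

-- Bertrand's postulate gives at least k primes below 2^k + 1
theorem pdCount_pow (k : Nat) : k ≤ Nat.count Nat.Prime (2 ^ k + 1) := by
  induction k with
  | zero => exact Nat.zero_le _
  | succ k ih =>
    obtain ⟨p, hp, h1, h2⟩ := Nat.exists_prime_lt_and_le_two_mul (2 ^ k) (by positivity)
    have hcs : Nat.count Nat.Prime (p + 1) = Nat.count Nat.Prime p + 1 := by
      rw [Nat.count_succ]; simp [hp]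
    have hle1 : 2 ^ k + 1 ≤ p := by omega
    have hle2 : p + 1 ≤ 2 ^ (k + 1) + 1 := by
      have : 2 ^ (k + 1) = 2 * 2 ^ k := by ring
      omega
    have m1 : Nat.count Nat.Prime (2 ^ k + 1) ≤ Nat.count Nat.Prime p :=
      Nat.count_monotone (p := Nat.Prime) hle1
    have m2 : Nat.count Nat.Prime (p + 1) ≤ Nat.count Nat.Prime (2 ^ (k + 1) + 1) :=
      Nat.count_monotone (p := Nat.Prime) hle2
    omega

-- under the loop guard (fewer than total primes found, i.e. fewer than total primes below n),
-- n has not yet reached the fuel bound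
theorem pdCount_le_bound {total n : Int} (_h0 : 0 ≤ n)
    (hc : ((Nat.count Nat.Prime n.toNat : Nat) : Int) < total) : n.toNat ≤ pdBound total := by
  by_contra hgt
  have hle : 2 ^ (total.toNat + 1) + 1 ≤ n.toNat := by
    unfold pdBound at hgt; omega
  have hmono : Nat.count Nat.Prime (2 ^ (total.toNat + 1) + 1) ≤ Nat.count Nat.Prime n.toNat :=
    Nat.count_monotone (p := Nat.Prime) hle
  have := pdCount_pow (total.toNat + 1)
  omega

theorem pdPrimes_sorted (m : Nat) : (pdPrimes m).Pairwise (· < ·) :=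
  (List.pairwise_lt_range).filter _

theorem pdPrimes_mem {m p : Nat} : p ∈ pdPrimes m ↔ Nat.Prime p ∧ p < m := by
  simp [pdPrimes, List.mem_filter, List.mem_range, and_comm]

-- composite odd m ≥ 3 has an odd prime factor q with q*q ≤ m and q < m
theorem pdMinFac_witness {m : Nat} (h2 : m % 2 = 1) (h3 : 3 ≤ m) (hnp : ¬ Nat.Prime m) :
    ∃ q : Nat, Nat.Prime q ∧ q % 2 = 1 ∧ 3 ≤ q ∧ q * q ≤ m ∧ q < m ∧ q ∣ m := by
  have hm1 : m ≠ 1 := by omega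
  have hq : Nat.Prime m.minFac := Nat.minFac_prime hm1
  have hd : m.minFac ∣ m := Nat.minFac_dvd m
  have hsq : m.minFac * m.minFac ≤ m := by
    have := Nat.minFac_sq_le_self (by omega) hnp
    simpa [pow_two] using this
  have hne2 : m.minFac ≠ 2 := by
    intro h
    have : 2 ∣ m := h ▸ hd
    omega
  have h2q : 2 ≤ m.minFac := hq.two_le
  have h3q : 3 ≤ m.minFac := by omega
  have hlt : m.minFac < m := by
    have h1 : m.minFac * 2 ≤ m.minFac * m.minFac := Nat.mul_le_mul_left _ h2q
    omega
  have hodd : m.minFac % 2 = 1 := by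
    rcases Nat.even_or_odd m.minFac with he | ho
    · exact absurd ((Nat.Prime.even_iff hq).mp he) hne2
    · exact Nat.odd_iff.mp ho
  exact ⟨m.minFac, hq, hodd, h3q, hsq, hlt, hd⟩

-- A's check over a sorted list of naturals equals "no listed p with p*p ≤ n divides n"
theorem pdCheckA_eq_forall {n : Int} (h0 : 0 ≤ n) :
    ∀ L : List Nat, L.Pairwise (· < ·) →
      ((pdCheckA n (L.map (fun p : Nat => ((p : Int), (p : Int) * (p : Int)))) = true) ↔
        ∀ p ∈ L, p * p ≤ n.toNat → ¬ p ∣ n.toNat)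
  | [], _ => by simp [pdCheckA]
  | p :: L, hs => by
    have hsL : L.Pairwise (· < ·) := hs.tail
    have hcast : ((p : Int) * (p : Int)) = ((p * p : Nat) : Int) := by push_cast; ring
    simp only [List.map_cons, pdCheckA, hcast]
    by_cases hgt : ((p * p : Nat) : Int) > n
    · simp only [if_pos hgt, true_iff]
      intro q hq hqle
      exfalso
      rw [List.mem_cons] at hq
      have hpq : p ≤ q := by
        rcases hq with h | h
        · omega
        · exact le_of_lt (List.rel_of_pairwise_cons hs h)
      have : p * p ≤ q * q := Nat.mul_le_mul hpq hpq
      omega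
    · simp only [if_neg hgt]
      have hple : p * p ≤ n.toNat := by omega
      by_cases hdvd : (p : Int) ∣ n
      · have : PySem.Int.mod n (p : Int) == 0 := by
          simp [beq_iff_eq, (PySem.Int.mod_eq_zero_iff_dvd n (p : Int))]; exact hdvd
        simp only [if_pos this, Bool.false_eq_true, false_iff]
        intro hall
        exact hall p (List.mem_cons_self) hple (by
          have := hdvd
          rwa [← Int.toNat_of_nonneg h0, Int.natCast_dvd_natCast] at this)
      · have : ¬ (PySem.Int.mod n (p : Int) == 0) := by
          simp [beq_iff_eq, (PySem.Int.mod_eq_zero_iff_dvd n (p : Int))]; exact hdvd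
        simp only [if_neg this]
        rw [pdCheckA_eq_forall h0 L hsL]
        constructor
        · intro hall q hq hqle
          rw [List.mem_cons] at hq
          rcases hq with h | h
          · subst h
            intro hc
            exact hdvd (by rw [← Int.toNat_of_nonneg h0] at *; exact_mod_cast hc)
          · exact hall q h hqle
        · intro hall q hq hqle
          exact hall q (List.mem_cons_of_mem _ hq) hqle

-- "no prime below m with square ≤ m divides m" characterizes primality of odd m ≥ 3
theorem pdPrime_iff_A {m : Nat} (h2 : m % 2 = 1) (h3 : 3 ≤ m) :
    (∀ p ∈ pdPrimes m, p * p ≤ m → ¬ p ∣ m) ↔ Nat.Prime m := by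
  constructor
  · intro hall
    by_contra hnp
    obtain ⟨q, hq, _, _, hsq, hlt, hd⟩ := pdMinFac_witness h2 h3 hnp
    exact hall q (pdPrimes_mem.mpr ⟨hq, hlt⟩) hsq hd
  · intro hp p hpm hsq hd
    obtain ⟨hq, hlt⟩ := pdPrimes_mem.mp hpm
    rcases (Nat.Prime.eq_one_or_self_of_dvd hp p hd) with h | h
    · exact Nat.Prime.one_lt hq |>.ne' h
    · omega

theorem pdCheckA_eq_decide {d : PySem.Dict Int Int} {n : Int} (h : pdInvA d n) :
    pdCheckA n d.items = decide (Nat.Prime n.toNat) := by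
  obtain ⟨hi, h2, h3⟩ := h
  have h0 : (0:Int) ≤ n := by omega
  have h2' : n.toNat % 2 = 1 := by omega
  have h3' : 3 ≤ n.toNat := by omega
  rw [hi]
  have hiff : (pdCheckA n ((pdPrimes n.toNat).map
      (fun p : Nat => ((p : Int), (p : Int) * (p : Int)))) = true) ↔ Nat.Prime n.toNat := by
    rw [pdCheckA_eq_forall h0 (pdPrimes n.toNat) (pdPrimes_sorted _)]
    exact pdPrime_iff_A h2' h3'
  by_cases hp : Nat.Prime n.toNat
  · rw [hiff.mpr hp]; simp [hp]
  · have hf : pdCheckA n ((pdPrimes n.toNat).map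
        (fun p : Nat => ((p : Int), (p : Int) * (p : Int)))) = false := by
      rw [← Bool.not_eq_true]
      exact fun hb => hp (hiff.mp hb)
    rw [hf]; simp [hp]

theorem pdPrimes_step {m : Nat} (h2 : m % 2 = 1) (h3 : 3 ≤ m) :
    pdPrimes (m + 2) = pdPrimes m ++ (if Nat.Prime m then [m] else []) := by
  have hnp1 : ¬ Nat.Prime (m + 1) := by
    obtain ⟨k, hk⟩ : ∃ k, m + 1 = 2 * k := ⟨(m+1)/2, by omega⟩
    rw [hk]
    exact Nat.not_prime_mul (by omega) (by omega)
  show (List.range (m+2)).filter _ = _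
  rw [show m + 2 = (m + 1) + 1 from rfl, List.range_succ, List.range_succ,
      List.filter_append, List.filter_append, List.append_assoc]
  congr 1
  by_cases hp : Nat.Prime m <;> simp [hp, hnp1]

theorem pdInvA_keys {d : PySem.Dict Int Int} {n : Int} (h : pdInvA d n) :
    d.keys = (pdPrimes n.toNat).map (fun p : Nat => (p : Int)) := by
  show d.items.map (·.1) = _
  rw [h.1, List.map_map]
  rfl

theorem pdInvA_step {d : PySem.Dict Int Int} {n : Int} (h : pdInvA d n) :
    pdInvA (if pdCheckA n d.items then d.insert n (n * n) else d) (n + 2) := by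
  obtain ⟨hi, h2, h3⟩ := h
  have h2' : n.toNat % 2 = 1 := by omega
  have h3' : 3 ≤ n.toNat := by omega
  have hnt : (n + 2).toNat = n.toNat + 2 := by omega
  have hcn : ((n.toNat : Int)) = n := Int.toNat_of_nonneg (by omega)
  rw [pdCheckA_eq_decide ⟨hi, h2, h3⟩]
  refine ⟨?_, by omega, by omega⟩
  rw [hnt, pdPrimes_step h2' h3', List.map_append]
  by_cases hp : Nat.Prime n.toNat
  · simp only [hp, decide_true, if_pos]
    have hnc : d.contains n = false := by
      rw [← Bool.not_eq_true]
      intro hc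
      have hmem := (PySem.Dict.contains_iff_mem_keys _ _).mp hc
      rw [pdInvA_keys ⟨hi, h2, h3⟩] at hmem
      obtain ⟨p, hpm, hpe⟩ := List.mem_map.mp hmem
      have : p < n.toNat := (pdPrimes_mem.mp hpm).2
      omega
    rw [PySem.Dict.items_insert_of_not_contains d (n * n) hnc, hi]
    simp [hcn]
  · simp only [hp, decide_false, if_neg, Bool.false_eq_true, not_false_iff, hi]
    simp

-- under the guard d*d ≤ n, d stays below n, so the remaining distance to n drops by 2
theorem pdIsOddDec {n d : Int} (h : d * d ≤ n) :
    (n + 1 - (d + 2)).toNat < (n + 1 - d).toNat := by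
  have hdn : d ≤ n := by
    by_cases hd : d ≤ 0
    · exact hd.trans (le_trans (mul_self_nonneg d) h)
    · have hd : 0 < d := by omega
      calc d = d * 1 := (mul_one d).symm
        _ ≤ d * d := mul_le_mul_of_nonneg_left hd hd.le
        _ ≤ n := h
  omega

theorem pdIsOddPrimeGo_iff {n : Int} :
    ∀ (f : Nat) (d : Int), (n + 1 - d).toNat < f → 3 ≤ d → d % 2 = 1 →
      (∀ e : Int, 3 ≤ e → e < d → e % 2 = 1 → ¬ e ∣ n) →
      ((pdIsOddPrimeGo n f d = true) ↔
        ∀ e : Int, 3 ≤ e → e % 2 = 1 → e * e ≤ n → ¬ e ∣ n) := by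
  intro f
  induction f with
  | zero => intro d hf; omega
  | succ f ih =>
    intro d hf h3 h2 hbelow
    show (if d * d ≤ n then _ else true) = true ↔ _
    by_cases hle : d * d ≤ n
    · simp only [if_pos hle]
      by_cases hdvd : d ∣ n
      · have hb : PySem.Int.mod n d == 0 := by
          simp [beq_iff_eq, PySem.Int.mod_eq_zero_iff_dvd n d]; exact hdvd
        simp only [if_pos hb, Bool.false_eq_true, false_iff]
        intro hall
        exact hall d h3 h2 hle hdvd
      · have hb : ¬ (PySem.Int.mod n d == 0) := by
          simp [beq_iff_eq, PySem.Int.mod_eq_zero_iff_dvd n d]; exact hdvd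
        simp only [if_neg hb]
        have hf' : (n + 1 - (d + 2)).toNat < f :=
          Nat.lt_of_lt_of_le (pdIsOddDec hle) (by omega)
        rw [ih (d + 2) hf' (by omega) (by omega) ?_]
        intro e he3 helt he2
        by_cases hed : e < d
        · exact hbelow e he3 hed he2
        · have : e = d ∨ e = d + 1 := by omega
          rcases this with h | h
          · exact h ▸ hdvd
          · omega
    · simp only [if_neg hle, true_iff]
      intro e he3 he2 hesq
      by_cases hed : e < d
      · exact hbelow e he3 hed he2
      · exfalso
        have hde : d ≤ e := by omega
        have : d * d ≤ e * e := mul_le_mul hde hde (by omega) (by omega)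
        omega

theorem pdPrime_iff_B {m : Nat} (h2 : m % 2 = 1) (h3 : 3 ≤ m) :
    (∀ e : Int, 3 ≤ e → e % 2 = 1 → e * e ≤ (m : Int) → ¬ e ∣ (m : Int)) ↔ Nat.Prime m := by
  constructor
  · intro hall
    by_contra hnp
    obtain ⟨q, _, hqo, hq3, hsq, _, hd⟩ := pdMinFac_witness h2 h3 hnp
    refine hall (q : Int) (by exact_mod_cast hq3) (by omega) ?_ (by exact_mod_cast hd)
    exact_mod_cast hsq
  · intro hp e he3 he2 hesq hd
    have he0 : 0 ≤ e := by omega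
    have hdn : e.toNat ∣ m := by
      rw [← Int.toNat_of_nonneg he0, Int.natCast_dvd_natCast] at hd
      exact hd
    have hsq' : e.toNat * e.toNat ≤ m := by
      have : ((e.toNat * e.toNat : Nat) : Int) ≤ (m : Int) := by
        push_cast
        rw [Int.toNat_of_nonneg he0]
        exact hesq
      exact_mod_cast this
    rcases (Nat.Prime.eq_one_or_self_of_dvd hp e.toNat hdn) with h | h
    · omega
    · have h3e : 3 ≤ e.toNat := by omega
      have : e.toNat * 2 ≤ e.toNat * e.toNat := Nat.mul_le_mul_left _ (by omega)
      omega

theorem pdIsOddPrime_eq {n : Int} (h2 : n % 2 = 1) (h3 : 3 ≤ n) :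
    pdIsOddPrime n = decide (Nat.Prime n.toNat) := by
  have hcn : ((n.toNat : Int)) = n := Int.toNat_of_nonneg (by omega)
  have hiff := pdIsOddPrimeGo_iff (n := n) (n.toNat + 1) 3 (by omega) (by omega) (by decide)
      (by intro e he3 helt _; omega)
  have hiff2 : (pdIsOddPrime n = true) ↔ Nat.Prime n.toNat := by
    rw [pdIsOddPrime, hiff, ← pdPrime_iff_B (by omega) (by omega)]
    rw [hcn]
  by_cases hp : Nat.Prime n.toNat
  · rw [hiff2.mpr hp]; simp [hp]
  · have hf : pdIsOddPrime n = false := by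
      rw [← Bool.not_eq_true]
      exact fun hb => hp (hiff2.mp hb)
    rw [hf]; simp [hp]

theorem pdInvB_step {l : List Int} {n : Int} (h : pdInvB l n) :
    pdInvB (if pdIsOddPrime n then l ++ [n] else l) (n + 2) := by
  obtain ⟨hl, h2, h3⟩ := h
  have hnt : (n + 2).toNat = n.toNat + 2 := by omega
  have hcn : ((n.toNat : Int)) = n := Int.toNat_of_nonneg (by omega)
  rw [pdIsOddPrime_eq h2 h3]
  refine ⟨?_, by omega, by omega⟩
  rw [hnt, pdPrimes_step (by omega) (by omega), List.map_append]
  by_cases hp : Nat.Prime n.toNat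
  · simp [hp, hl, hcn]
  · simp [hp, hl]

-- the two loops, run from corresponding states with enough fuel, agree
theorem pdLoop_keys_eq (total : Int) :
    ∀ (fA fB : Nat) (n : Int) (d : PySem.Dict Int Int) (l : List Int),
      pdInvA d n → pdInvB l n →
      pdBound total + 3 - n.toNat ≤ fA → pdBound total + 3 - n.toNat ≤ fB →
      3 ≤ n.toNat →
      (pdLoopA total fA d n).keys = pdLoopB total fB l n := by
  intro fA
  induction fA with
  | zero =>
    -- fuel 0 forces the measure to be 0, so n is past the bound and the guard must fail
    intro fB n d l hA hB hfA hfB h3n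
    have hsz : d.size = (pdPrimes n.toNat).length := by
      show d.items.length = _
      rw [hA.1, List.length_map]
    have hguard : ¬ ((d.size : Nat) : Int) < total := by
      intro hg
      have hcnt : ((Nat.count Nat.Prime n.toNat : Nat) : Int) < total := by
        rw [← pdPrimes_length, ← hsz]; exact hg
      have := pdCount_le_bound (by omega) hcnt
      omega
    -- pdLoopA with fuel 0 returns d; show pdLoopB also returns l whatever its fuel
    have hlen : ¬ ((l.length : Nat) : Int) < total := by
      have h2 : l.length = (pdPrimes n.toNat).length := by rw [hB.1, List.length_map]
      rw [show ((l.length : Nat) : Int) = ((d.size : Nat) : Int) by rw [h2, hsz]]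
      exact hguard
    have hBval : pdLoopB total fB l n = l := by
      cases fB with
      | zero => rfl
      | succ fB => show (if _ < total then _ else l) = l; rw [if_neg hlen]
    rw [hBval]
    exact (pdInvA_keys hA).trans hB.1.symm
  | succ fA ih =>
    intro fB n d l hA hB hfA hfB h3n
    have hsz : d.size = (pdPrimes n.toNat).length := by
      show d.items.length = _
      rw [hA.1, List.length_map]
    have hlen : l.length = (pdPrimes n.toNat).length := by rw [hB.1, List.length_map]
    have hszl : ((d.size : Nat) : Int) = ((l.length : Nat) : Int) := by rw [hsz, hlen]
    by_cases hg : ((d.size : Nat) : Int) < total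
    · -- guard holds: one step each, then the induction hypothesis
      have hg' : ((l.length : Nat) : Int) < total := by rw [← hszl]; exact hg
      have hcnt : ((Nat.count Nat.Prime n.toNat : Nat) : Int) < total := by
        rw [← pdPrimes_length, ← hsz]; exact hg
      have hbnd := pdCount_le_bound (n := n) (by omega) hcnt
      cases fB with
      | zero => omega
      | succ fB =>
        show (if _ < total then pdLoopA total fA _ (n + 2) else d).keys =
          (if _ < total then pdLoopB total fB _ (n + 2) else l)
        rw [if_pos hg, if_pos hg']
        exact ih fB (n + 2) _ _ (pdInvA_step hA) (pdInvB_step hB)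
          (by omega) (by omega) (by omega)
    · have hg' : ¬ ((l.length : Nat) : Int) < total := by rw [← hszl]; exact hg
      have hAval : pdLoopA total (fA + 1) d n = d := by
        show (if _ < total then _ else d) = d
        rw [if_neg hg]
      have hBval : pdLoopB total fB l n = l := by
        cases fB with
        | zero => rfl
        | succ fB =>
          show (if _ < total then _ else l) = l
          rw [if_neg hg']
      rw [hAval, hBval]
      exact (pdInvA_keys hA).trans hB.1.symm

theorem pdInvA_init : pdInvA (PySem.Dict.ofList [(2, 4)]) 3 := by
  unfold pdInvA pdPrimes
  exact ⟨by decide, by decide, by decide⟩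

theorem pdInvB_init : pdInvB [2] 3 := by
  unfold pdInvB pdPrimes
  exact ⟨by decide, by decide, by decide⟩

-- ===== VERDICT (by name: the statement is the Claim_ definition above) =====
theorem primes_dict_spec : Claim_equal_primes_dict := by
  intro total _
  unfold Spec_primes_dict primes_dict primes_dict_alt
  exact pdLoop_keys_eq total (pdBound total + 3) (pdBound total + 3) 3
    (PySem.Dict.ofList [(2, 4)]) [2] pdInvA_init pdInvB_init (by omega) (by omega) (by decide)
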